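-- pv_equiv track=rewrite | github.com/SulaimanKhydyrDUKE/Leetcode | EBayOA.py | prefix_reduce
-- ===== SOURCE A (Python) =====
-- def prefix_reduce(nums):
--     nums = nums[:]  # copy
--     ret = 0
--     n = len(nums)
--
--     while True:
--         i = 0
--         while i < n and nums[i] == 0:
--             i += 1
--         if i == n:
--             break
--
--         x = nums[i]
--         ret += x
--
--         j = i
--         while j < n and nums[j] >= x:
--             nums[j] -= x
--             j += 1
--
--     return ret
-- ===== SOURCE B (Python) =====
-- def prefix_reduce(nums):
--     # One left-to-right pass maintaining the list of still-active subtraction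
--     # layers; a dominance fast path applies all layers in O(1).
--     ret = 0
--     active = []   # surviving subtraction layers, oldest first
--     S = 0         # sum(active)
--     M = None      # max over nonempty prefixes of active of their sum; None iff active empty
--     for a in nums:
--         if M is not None and a >= M:
--             # a dominates every prefix sum: every layer survives, apply them all at once
--             r = a - S
--             if r != 0:
--                 active.append(r)
--                 S += r
--                 M = max(M, S)
--         else:
--             r = a
--             survivors = []
--             for x in active:
--                 if r >= x:
--                     r -= x
--                     survivors.append(x)
--             if r != 0:
--                 survivors.append(r)
--             active = survivors
--             S = 0
--             M = None
--             for x in active: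
--                 S += x
--                 M = S if M is None else max(M, S)
--         ret += r
--     return ret
-- ===== Notes on version B (the rewrite author's own statement) =====
-- stated objective: faster
-- what changed: Replaces the repeated rescan-and-subtract simulation (each round rescans from index 0 for the leftmost nonzero x and subtracts it from the following run) by a single left-to-right pass that maintains the list of still-active subtraction layers with their sum and maximal prefix sum, applying all layers in O(1) when the new element dominates every prefix sum.
import Mathlib
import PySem

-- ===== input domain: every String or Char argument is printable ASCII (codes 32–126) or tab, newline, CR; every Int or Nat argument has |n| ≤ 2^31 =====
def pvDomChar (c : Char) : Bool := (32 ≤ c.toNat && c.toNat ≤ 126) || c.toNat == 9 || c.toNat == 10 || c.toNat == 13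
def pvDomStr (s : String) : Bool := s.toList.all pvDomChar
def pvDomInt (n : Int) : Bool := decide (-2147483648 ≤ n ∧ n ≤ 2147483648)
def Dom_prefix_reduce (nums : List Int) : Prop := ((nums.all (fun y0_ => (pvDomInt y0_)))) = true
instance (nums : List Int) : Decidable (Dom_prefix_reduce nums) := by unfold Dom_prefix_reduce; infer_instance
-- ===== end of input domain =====

-- B replaces A's repeated rescan-and-subtract rounds by one pass keeping the active
-- subtraction layers; objective: faster (measured).

-- ===== PORT A =====
-- inner scan `while i < n and nums[i] == 0: i += 1`
def pvFindNZ (l : List Int) (i : Nat) : Nat :=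
  if _h : i < l.length ∧ l.getD i 0 = 0 then pvFindNZ l (i + 1) else i
termination_by l.length - i
decreasing_by omega

-- inner scan `while j < n and nums[j] >= x: nums[j] -= x; j += 1` (mutation as List.set)
def pvSubRun (l : List Int) (j : Nat) (x : Int) : List Int :=
  if _h : j < l.length ∧ x ≤ l.getD j 0 then
    pvSubRun (l.set j (l.getD j 0 - x)) (j + 1) x
  else l
termination_by l.length - j
decreasing_by simp; omega

-- outer `while True` loop; fuel only makes it total (n+1 rounds always suffice)
def pvOuter (fuel : Nat) (l : List Int) (ret : Int) : Int :=
  match fuel with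
  | 0 => ret
  | fuel + 1 =>
    let i := pvFindNZ l 0
    if i = l.length then ret
    else
      let x := l.getD i 0
      pvOuter fuel (pvSubRun l i x) (ret + x)

def prefix_reduce (nums : List Int) : Int := pvOuter (nums.length + 1) nums 0

-- ===== PORT B =====
-- the inner `for x in active` survivor loop of Source B: fold r through the layers
def pvStep : List Int → Int → Int × List Int
  | [], r => (r, [])
  | x :: rest, r =>
    if x ≤ r then
      let p := pvStep rest (r - x)
      (p.1, x :: p.2)
    else pvStep rest r

-- one step of Source B's `S += x; M = S if M is None else max(M, S)` recompute loop
def pvSMstep (p : Int × Option Int) (x : Int) : Int × Option Int :=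
  (p.1 + x, some (match p.2 with | none => p.1 + x | some m => max m (p.1 + x)))

-- the recompute loop itself
def pvSM (l : List Int) : Int × Option Int := l.foldl pvSMstep (0, none)

-- the outer `for a in nums` loop of Source B, carrying active, S, M
def pvLoop2 : List Int → Int → Option Int → List Int → Int
  | _, _, _, [] => 0
  | acts, S, M, a :: t =>
    match M with
    | some m =>
      if m ≤ a then
        -- fast path: every layer survives
        let r := a - S
        if r = 0 then r + pvLoop2 acts S (some m) t
        else r + pvLoop2 (acts ++ [r]) (S + r) (some (max m (S + r))) t
      else
        let p := pvStep acts a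
        let acts' := if p.1 = 0 then p.2 else p.2 ++ [p.1]
        let q := pvSM acts'
        p.1 + pvLoop2 acts' q.1 q.2 t
    | none =>
        let p := pvStep acts a
        let acts' := if p.1 = 0 then p.2 else p.2 ++ [p.1]
        let q := pvSM acts'
        p.1 + pvLoop2 acts' q.1 q.2 t

def prefix_reduce_alt (nums : List Int) : Int := pvLoop2 [] 0 none nums

-- ===== PRECONDITION & SPEC =====
def Spec_prefix_reduce (nums : List Int) (out : Int) : Prop := out = prefix_reduce_alt nums
instance (nums : List Int) (out : Int) : Decidable (Spec_prefix_reduce nums out) := by unfold Spec_prefix_reduce; infer_instance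

-- ===== CLAIM (what is proved, stated in full; the proofs are below) =====
def Claim_equal_prefix_reduce : Prop := ∀ (nums : List Int), Dom_prefix_reduce nums → Spec_prefix_reduce nums (prefix_reduce nums)

-- ===== LEMMAS AND PROOFS =====

-- reference form of B's outer loop without the S/M bookkeeping
def pvLoop : List Int → List Int → Int
  | _, [] => 0
  | acts, a :: t =>
    let p := pvStep acts a
    p.1 + pvLoop (if p.1 = 0 then p.2 else p.2 ++ [p.1]) t

-- one subtraction pass of amount x over a list (prefix of elements ≥ x)
def pvDec (x : Int) : List Int → List Int
  | [] => []
  | b :: t => if x ≤ b then (b - x) :: pvDec x t else b :: t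

theorem pvDec_length (x : Int) (l : List Int) : (pvDec x l).length = l.length := by
  induction l with
  | nil => rfl
  | cons b t ih => simp only [pvDec]; split <;> simp [ih]

-- common recursive characterisation: take the head, subtract it from the run
def pvF : List Int → Int
  | [] => 0
  | a :: t => a + pvF (pvDec a t)
termination_by l => l.length
decreasing_by simp [pvDec_length]

theorem pvDec_zero (l : List Int) : pvDec 0 l = l := by
  induction l with
  | nil => rfl
  | cons b t ih => simp only [pvDec]; split <;> simp [ih]

def pvApply (acts : List Int) (l : List Int) : List Int :=
  acts.foldl (fun m x => pvDec x m) l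

theorem pvApply_nil (acts : List Int) : pvApply acts [] = [] := by
  induction acts with
  | nil => rfl
  | cons x r ih => simpa [pvApply, pvDec] using ih

theorem pvApply_cons (acts : List Int) (a : Int) (t : List Int) :
    pvApply acts (a :: t) = (pvStep acts a).1 :: pvApply (pvStep acts a).2 t := by
  induction acts generalizing a t with
  | nil => simp [pvApply, pvStep]
  | cons x r ih =>
    by_cases h : x ≤ a
    · simp only [pvApply, List.foldl_cons, pvDec, if_pos h] at *
      simpa [pvStep, h] using ih (a - x) (pvDec x t)
    · simp only [pvApply, List.foldl_cons, pvDec, if_neg h] at *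
      simpa [pvStep, h] using ih a t

theorem pvApply_append (acts : List Int) (x : Int) (l : List Int) :
    pvApply (acts ++ [x]) l = pvDec x (pvApply acts l) := by
  simp [pvApply]

theorem pvLoop_apply (l : List Int) : ∀ acts, pvLoop acts l = pvF (pvApply acts l) := by
  induction l with
  | nil => intro acts; simp [pvLoop, pvApply_nil, pvF]
  | cons a t ih =>
    intro acts
    rw [pvApply_cons, pvF]
    by_cases h0 : (pvStep acts a).1 = 0
    · simp only [pvLoop, if_pos h0]
      rw [ih (pvStep acts a).2, h0, pvDec_zero]
    · simp only [pvLoop, if_neg h0]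
      rw [ih ((pvStep acts a).2 ++ [(pvStep acts a).1]), pvApply_append]

theorem pvSM_mono (rest : List Int) : ∀ (S' m' : Int),
    ∃ m, (List.foldl pvSMstep (S', some m') rest).2 = some m ∧ m' ≤ m := by
  induction rest with
  | nil => intro S' m'; exact ⟨m', rfl, le_refl m'⟩
  | cons x r ih =>
    intro S' m'
    obtain ⟨m, hm, hle⟩ := ih (S' + x) (max m' (S' + x))
    exact ⟨m, by simpa [pvSMstep] using hm, le_trans (le_max_left _ _) hle⟩

theorem pvStep_all (acts : List Int) : ∀ (a S0 : Int) (M0 : Option Int) (S m : Int),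
    List.foldl pvSMstep (S0, M0) acts = (S, some m) → m ≤ a →
    pvStep acts (a - S0) = (a - S, acts) := by
  induction acts with
  | nil => intro a S0 M0 S m h hm; cases h; simp [pvStep]
  | cons x rest ih =>
    intro a S0 M0 S m h hm
    obtain ⟨m1, hm1, hle1⟩ : ∃ m1, pvSMstep (S0, M0) x = (S0 + x, some m1) ∧ S0 + x ≤ m1 := by
      cases M0 <;> simp [pvSMstep]
    have hfold : List.foldl pvSMstep (S0 + x, some m1) rest = (S, some m) := by
      rw [List.foldl_cons, hm1] at h; exact h
    have hxa : S0 + x ≤ a := by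
      obtain ⟨mf, hmf, hle⟩ := pvSM_mono rest (S0 + x) m1
      rw [hfold] at hmf
      cases hmf
      omega
    have hx : x ≤ a - S0 := by omega
    have ihr := ih a (S0 + x) (some m1) S m hfold hm
    rw [pvStep, if_pos hx]
    have heq : a - S0 - x = a - (S0 + x) := by ring
    rw [heq, ihr]

theorem pvSM_append (acts : List Int) (r : Int) :
    pvSM (acts ++ [r]) = pvSMstep (pvSM acts) r := by
  simp [pvSM]

theorem pvLoop2_eq_pvLoop (l : List Int) : ∀ (acts : List Int) (S : Int) (M : Option Int),
    pvSM acts = (S, M) → pvLoop2 acts S M l = pvLoop acts l := by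
  induction l with
  | nil => intro acts S M _; cases M <;> rfl
  | cons a t ih =>
    intro acts S M hinv
    cases M with
    | none =>
      simp only [pvLoop2, pvLoop]
      exact congrArg _ (ih _ _ _ (by simp))
    | some m =>
      by_cases hfa : m ≤ a
      · have hstep : pvStep acts a = (a - S, acts) := by
          have := pvStep_all acts a 0 none S m (by simpa [pvSM] using hinv) hfa
          simpa using this
        simp only [pvLoop2, if_pos hfa, pvLoop, hstep]
        by_cases hr : a - S = 0
        · rw [if_pos hr, if_pos hr, ih acts S (some m) hinv]
        · rw [if_neg hr, if_neg hr, ih (acts ++ [a - S]) (S + (a - S)) (some (max m (S + (a - S))))]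
          rw [pvSM_append, hinv, pvSMstep]
      · simp only [pvLoop2, if_neg hfa, pvLoop]
        exact congrArg _ (ih _ _ _ (by simp))

theorem alt_eq_pvF (nums : List Int) : prefix_reduce_alt nums = pvF nums := by
  rw [prefix_reduce_alt, pvLoop2_eq_pvLoop nums [] 0 none rfl]
  have := pvLoop_apply nums []
  simpa [pvApply] using this

-- ---- A side ----

def pvZeros : List Int → Nat
  | [] => 0
  | a :: t => if a = 0 then pvZeros t + 1 else 0

theorem pvZeros_le (l : List Int) : pvZeros l ≤ l.length := by
  induction l with
  | nil => simp [pvZeros]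
  | cons a t ih => simp only [pvZeros]; split <;> simp <;> omega

theorem pvFindNZ_eq (l : List Int) : ∀ i, pvFindNZ l i = i + pvZeros (l.drop i) := by
  intro i
  induction hn : l.length - i using Nat.strong_induction_on generalizing i with
  | _ n ih =>
    rw [pvFindNZ]
    by_cases h : i < l.length ∧ l.getD i 0 = 0
    · obtain ⟨h1, h2⟩ := h
      rw [dif_pos ⟨h1, h2⟩]
      have hd : l.drop i = l[i] :: l.drop (i + 1) := List.drop_eq_getElem_cons h1
      have hg : l[i] = (0 : Int) := by
        have := List.getD_eq_getElem l 0 h1; rw [this] at h2; exact h2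
      rw [ih (l.length - (i+1)) (by omega) (i+1) rfl, hd, hg]
      simp [pvZeros]; omega
    · rw [dif_neg h]
      rcases Nat.lt_or_ge i l.length with hlt | hge
      · have h2 : l.getD i 0 ≠ 0 := fun hc => h ⟨hlt, hc⟩
        have hd : l.drop i = l[i] :: l.drop (i + 1) := List.drop_eq_getElem_cons hlt
        have hg : l[i] ≠ (0 : Int) := by
          have := List.getD_eq_getElem l 0 hlt; rw [this] at h2; exact h2
        rw [hd]; simp [pvZeros, hg]
      · rw [List.drop_eq_nil_of_le hge]; simp [pvZeros]

theorem pvZeros_replicate_append (k : Nat) (m : List Int) :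
    pvZeros (List.replicate k 0 ++ m) = k + pvZeros m := by
  induction k with
  | zero => simp
  | succ k ih => simp [List.replicate_succ, pvZeros, ih]; omega

theorem pvTake_zeros (l : List Int) : l.take (pvZeros l) = List.replicate (pvZeros l) 0 := by
  induction l with
  | nil => simp [pvZeros]
  | cons a t ih =>
    simp only [pvZeros]
    by_cases h : a = 0
    · simp [h, List.replicate_succ, ih]
    · simp [h]

theorem pvSubRun_eq (x : Int) (l : List Int) : ∀ j, pvSubRun l j x = l.take j ++ pvDec x (l.drop j) := by
  intro j
  induction hn : l.length - j using Nat.strong_induction_on generalizing l j with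
  | _ n ih =>
    rw [pvSubRun]
    by_cases h : j < l.length ∧ x ≤ l.getD j 0
    · obtain ⟨h1, h2⟩ := h
      rw [dif_pos ⟨h1, h2⟩]
      have hlen : (l.set j (l.getD j 0 - x)).length = l.length := by simp
      rw [ih ((l.set j (l.getD j 0 - x)).length - (j+1)) (by omega) _ (j+1) rfl]
      have hg : l.getD j 0 = l[j] := List.getD_eq_getElem l 0 h1
      have hd : l.drop j = l[j] :: l.drop (j + 1) := List.drop_eq_getElem_cons h1
      have htake : (l.set j (l.getD j 0 - x)).take (j+1) = l.take j ++ [l[j] - x] := by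
        rw [hg, List.take_add_one, List.take_set_of_le (Nat.le_refl j)]
        simp [h1]
      have hdrop : (l.set j (l.getD j 0 - x)).drop (j+1) = l.drop (j+1) := by
        rw [List.drop_set_of_lt (by omega)]
      rw [htake, hdrop, hd]
      rw [hg] at h2
      simp [pvDec, h2]
    · rw [dif_neg h]
      rcases Nat.lt_or_ge j l.length with hlt | hge
      · have h2 : ¬ x ≤ l.getD j 0 := fun hc => h ⟨hlt, hc⟩
        have hg : l.getD j 0 = l[j] := List.getD_eq_getElem l 0 hlt
        have hd : l.drop j = l[j] :: l.drop (j + 1) := List.drop_eq_getElem_cons hlt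
        rw [hg] at h2
        rw [hd]
        simp [pvDec, h2]
      · rw [List.drop_eq_nil_of_le hge]
        simp [pvDec, List.take_of_length_le hge]

theorem pvF_zeros (k : Nat) (m : List Int) : pvF (List.replicate k 0 ++ m) = pvF m := by
  induction k with
  | zero => simp
  | succ k ih => simp [List.replicate_succ, pvF, pvDec_zero, ih]

theorem pvOuter_eq (fuel : Nat) : ∀ (l : List Int) (ret : Int),
    l.length - pvFindNZ l 0 < fuel → pvOuter fuel l ret = ret + pvF l := by
  induction fuel with
  | zero => intro l ret h; omega
  | succ fuel ih =>
    intro l ret h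
    rw [pvOuter]
    have hz := pvFindNZ_eq l 0
    simp only [List.drop_zero, Nat.zero_add] at hz
    set i := pvFindNZ l 0 with hi
    have hzl : i = pvZeros l := hz
    have hile : i ≤ l.length := hzl ▸ pvZeros_le l
    by_cases hend : i = l.length
    · rw [if_pos hend]
      -- l is all zeros
      have : l = List.replicate i 0 ++ [] := by
        have := pvTake_zeros l
        rw [← hzl] at this
        rw [← this, hend]
        simp
      rw [this, pvF_zeros]
      simp [pvF]
    · rw [if_neg hend]
      have hlt : i < l.length := lt_of_le_of_ne hile hend
      have hg : l.getD i 0 = l[i] := List.getD_eq_getElem l 0 hlt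
      have hd : l.drop i = l[i] :: l.drop (i + 1) := List.drop_eq_getElem_cons hlt
      have hrepl : l.take i = List.replicate i 0 := by
        have := pvTake_zeros l; rw [← hzl] at this; exact this
      have hsplit : l = List.replicate i 0 ++ l[i] :: l.drop (i+1) := by
        conv_lhs => rw [← List.take_append_drop i l]
        rw [hrepl, hd]
      have hsub : pvSubRun l i l[i] = List.replicate (i+1) 0 ++ pvDec l[i] (l.drop (i+1)) := by
        rw [pvSubRun_eq, hd, hrepl]
        simp [pvDec]
        rw [List.replicate_succ']
        simp
      have hfl : pvF l = l[i] + pvF (pvSubRun l i l[i]) := by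
        conv_lhs => rw [hsplit]
        rw [pvF_zeros, pvF, hsub, pvF_zeros]
      have hlen' : (pvSubRun l i l[i]).length = l.length := by
        rw [hsub]
        have := pvDec_length l[i] (l.drop (i+1))
        simp [this]
        omega
      have hnz' : pvFindNZ (pvSubRun l i l[i]) 0 ≥ i + 1 := by
        have h2 := pvFindNZ_eq (pvSubRun l i l[i]) 0
        simp only [List.drop_zero, Nat.zero_add] at h2
        rw [h2, hsub, pvZeros_replicate_append]
        omega
      rw [hg, ih (pvSubRun l i l[i]) (ret + l[i]) (by omega), hfl]
      ring

-- ===== VERDICT (by name: the statement is the Claim_ definition above) =====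
theorem prefix_reduce_spec : Claim_equal_prefix_reduce := by
  intro nums _
  show prefix_reduce nums = prefix_reduce_alt nums
  rw [alt_eq_pvF, prefix_reduce, pvOuter_eq (nums.length + 1) nums 0 (by omega)]
  ring
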